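-- pv_equiv track=rewrite | github.com/1629lyk/CS-218-Spring-2025 | HW2-Basic/A-Seating-Arrangements/codef.py | max_happy_people
-- ===== SOURCE A (Python) =====
-- def max_happy_people(r, a):
--     total = sum(a)
--     pairs_count = sum(x // 2 for x in a)
--
--     possi = 0
--     max_x = min(pairs_count, total // 2, r)
--
--     for x in range(max_x + 1):
--         leftover = total - 2 * x
--         leftover_rows = r - x
--
--         # lgoic for singles seats
--         if leftover <= 2 * leftover_rows:
--             sin = min(leftover, leftover_rows, 2 * leftover_rows - leftover)
--             sin = max(0, sin)
--             current_happy = 2 * x + sin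
--             possi = max(possi, current_happy)
--
--     return possi
-- ===== SOURCE B (Python) =====
-- def max_happy_people(r, a):
--     # the loop objective is nondecreasing in x, so take x = max_x directly
--     total = sum(a)
--     pairs_count = sum(x // 2 for x in a)
--     x = min(pairs_count, total // 2, r)
--     if x < 0 or total > 2 * r:
--         return 0
--     return 2 * x + min(total - 2 * x, r - x, 2 * r - total)
-- ===== Notes on version B (the rewrite author's own statement) =====
-- stated objective: simpler
-- what changed: The loop's candidate value 2*x + max(0, min(total-2x, r-x, 2r-total)) is nondecreasing in x (each min term drops by at most 2 per step), so B replaces A's scan over range(max_x+1) with the closed form evaluated once at x = max_x; the cost stays dominated by summing a.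
import Mathlib
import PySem

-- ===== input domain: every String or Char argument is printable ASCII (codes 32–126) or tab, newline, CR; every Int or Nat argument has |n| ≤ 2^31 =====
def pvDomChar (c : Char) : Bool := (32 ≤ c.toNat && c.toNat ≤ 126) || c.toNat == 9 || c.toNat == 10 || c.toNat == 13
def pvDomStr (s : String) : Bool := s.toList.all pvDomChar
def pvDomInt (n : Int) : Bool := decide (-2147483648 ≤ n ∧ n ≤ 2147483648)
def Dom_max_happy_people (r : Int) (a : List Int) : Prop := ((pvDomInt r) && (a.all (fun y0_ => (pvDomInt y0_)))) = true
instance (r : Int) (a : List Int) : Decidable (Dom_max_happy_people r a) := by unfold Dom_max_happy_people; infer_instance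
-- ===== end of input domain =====

-- B replaces A's scan over x by the closed form at x = max_x (the loop objective is nondecreasing in x); simpler.

-- ===== PORT A =====
def max_happy_people (r : Int) (a : List Int) : Int :=
  let total := a.sum
  let pairs_count := (a.map (fun x => PySem.Int.floordiv x 2)).sum
  let possi : Int := 0
  let max_x := min pairs_count (min (PySem.Int.floordiv total 2) r)
  (PySem.List.pyRange 0 (max_x + 1) 1).foldl
    (fun possi x =>
      let leftover := total - 2 * x
      let leftover_rows := r - x
      if leftover ≤ 2 * leftover_rows then
        let sin := min leftover (min leftover_rows (2 * leftover_rows - leftover))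
        let sin := max 0 sin
        let current_happy := 2 * x + sin
        max possi current_happy
      else possi) possi

-- ===== PORT B =====
def max_happy_people_alt (r : Int) (a : List Int) : Int :=
  let total := a.sum
  let pairs_count := (a.map (fun x => PySem.Int.floordiv x 2)).sum
  let x := min pairs_count (min (PySem.Int.floordiv total 2) r)
  if x < 0 ∨ total > 2 * r then 0
  else 2 * x + min (total - 2 * x) (min (r - x) (2 * r - total))

-- ===== PRECONDITION & SPEC =====
def Spec_max_happy_people (r : Int) (a : List Int) (out : Int) : Prop := out = max_happy_people_alt r a
instance (r : Int) (a : List Int) (out : Int) : Decidable (Spec_max_happy_people r a out) := by unfold Spec_max_happy_people; infer_instance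

-- ===== CLAIM =====
def Claim_equal_max_happy_people : Prop := ∀ (r : Int) (a : List Int), Dom_max_happy_people r a → Spec_max_happy_people r a (max_happy_people r a)

-- ===== LEMMAS AND PROOFS =====

-- the value A's loop body considers at position x
def pvF (r total x : Int) : Int :=
  2 * x + max 0 (min (total - 2 * x) (min (r - x) (2 * (r - x) - (total - 2 * x))))

def pvStep (r total : Int) : Int → Int → Int := fun possi x =>
  let leftover := total - 2 * x
  let leftover_rows := r - x
  if leftover ≤ 2 * leftover_rows then
    let sin := min leftover (min leftover_rows (2 * leftover_rows - leftover))
    let sin := max 0 sin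
    let current_happy := 2 * x + sin
    max possi current_happy
  else possi

lemma pvF_mono (r total x : Int) : pvF r total x ≤ pvF r total (x + 1) := by
  unfold pvF; omega

lemma pvStep_eq (r total c x : Int) (h : total ≤ 2 * r) :
    pvStep r total c x = max c (pvF r total x) := by
  unfold pvStep pvF
  rw [if_pos (by omega)]

lemma loop_skip (r total : Int) (h : 2 * r < total) (l : List Int) (c : Int) :
    l.foldl (pvStep r total) c = c := by
  induction l generalizing c with
  | nil => rfl
  | cons x xs ih =>
      have : pvStep r total c x = c := by unfold pvStep; rw [if_neg (by omega)]
      simp [List.foldl_cons, this, ih]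

lemma loop_closed (r total : Int) (h : total ≤ 2 * r) (n : Nat) (c : Int) :
    (PySem.List.pyRange 0 ((n : Int) + 1) 1).foldl (pvStep r total) c
      = max c (pvF r total n) := by
  induction n generalizing c with
  | zero =>
      have h0 : ((0:Nat):Int) + 1 = 0 + 1 := by norm_num
      rw [h0, PySem.List.pyRange_one_singleton]
      simp [pvStep_eq r total c 0 h]
  | succ k ih =>
      have hsplit : PySem.List.pyRange 0 ((k : Int) + 1 + 1) 1
          = PySem.List.pyRange 0 ((k : Int) + 1) 1 ++ [(k : Int) + 1] := by
        exact PySem.List.pyRange_one_succ_right (by positivity)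
      push_cast
      rw [hsplit, List.foldl_append, ih, List.foldl_cons, List.foldl_nil,
        pvStep_eq r total _ _ h]
      have hm := pvF_mono r total (k : Int)
      omega

-- ===== VERDICT =====
theorem max_happy_people_spec : Claim_equal_max_happy_people := by
  intro r a _
  unfold Spec_max_happy_people max_happy_people max_happy_people_alt
  set total := a.sum with htot
  set pairs_count := (a.map (fun x => PySem.Int.floordiv x 2)).sum with hpc
  set mx := min pairs_count (min (PySem.Int.floordiv total 2) r) with hmx
  show (PySem.List.pyRange 0 (mx + 1) 1).foldl _ 0 = _
  have hstep : (fun possi x =>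
      let leftover := total - 2 * x
      let leftover_rows := r - x
      if leftover ≤ 2 * leftover_rows then
        let sin := min leftover (min leftover_rows (2 * leftover_rows - leftover))
        let sin := max 0 sin
        let current_happy := 2 * x + sin
        max possi current_happy
      else possi) = pvStep r total := rfl
  rw [hstep]
  by_cases hneg : mx < 0
  · rw [PySem.List.pyRange_one_eq_nil (by omega)]
    rw [if_pos (Or.inl hneg)]
    rfl
  · push Not at hneg
    by_cases hbig : 2 * r < total
    · rw [loop_skip r total hbig, if_pos (Or.inr hbig)]
    · push Not at hbig
      rw [if_neg (by omega)]
      have hmx2 : mx ≤ PySem.Int.floordiv total 2 := by omega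
      have hfd : 2 * PySem.Int.floordiv total 2 ≤ total := by
        have h2 : PySem.Int.floordiv total 2 = total / 2 := by
          simp [PySem.Int.floordiv, Int.fdiv_eq_ediv]
        rw [h2]; omega
      have h2mx : 2 * mx ≤ total := by
        have : 2 * mx ≤ 2 * PySem.Int.floordiv total 2 := by omega
        omega
      have hr : mx ≤ r := by omega
      obtain ⟨n, hn⟩ := Int.eq_ofNat_of_zero_le hneg
      rw [hn, loop_closed r total hbig n 0, ← hn]
      unfold pvF
      omega
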